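-- pv_equiv track=rewrite | github.com/GlenboLake/adventofcode | aoc2017/day6.py | realloc
-- ===== SOURCE A (Python) =====
-- def realloc(init):
--     current = init.copy()
--     count = len(init)
--     states = [init]
--     while True:
--         new_state = current.copy()
--         i = current.index(max(current))
--         value = current[i]
--         new_state[i] = 0
--         for j in range(value):
--             new_state[(i + j + 1) % count] += 1
--         if new_state in states:
--             break
--         states.append(new_state)
--         current = new_state
--     return len(states), len(states) - states.index(new_state)
-- ===== SOURCE B (Python) =====
-- def realloc(init):
--     count = len(init)
--     state = list(init)
--     seen = {tuple(init): 0}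
--     step = 0
--     while True:
--         i = state.index(max(state))
--         v = state[i]
--         state[i] = 0
--         if v > 0:
--             q, r = divmod(v, count)
--             for k in range(count):
--                 state[k] += q
--             for k in range(r):
--                 state[(i + 1 + k) % count] += 1
--         step += 1
--         t = tuple(state)
--         if t in seen:
--             return step, step - seen[t]
--         seen[t] = step
-- ===== Notes on version B (the rewrite author's own statement) =====
-- stated objective: faster
-- what changed: B replaces A's linear scan of the seen-states list and one-token-at-a-time redistribution loop by a dict mapping each seen state to its step index and an arithmetic divmod redistribution (add v//count to every cell, +1 to the first v%count cells after the source).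
import Mathlib
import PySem

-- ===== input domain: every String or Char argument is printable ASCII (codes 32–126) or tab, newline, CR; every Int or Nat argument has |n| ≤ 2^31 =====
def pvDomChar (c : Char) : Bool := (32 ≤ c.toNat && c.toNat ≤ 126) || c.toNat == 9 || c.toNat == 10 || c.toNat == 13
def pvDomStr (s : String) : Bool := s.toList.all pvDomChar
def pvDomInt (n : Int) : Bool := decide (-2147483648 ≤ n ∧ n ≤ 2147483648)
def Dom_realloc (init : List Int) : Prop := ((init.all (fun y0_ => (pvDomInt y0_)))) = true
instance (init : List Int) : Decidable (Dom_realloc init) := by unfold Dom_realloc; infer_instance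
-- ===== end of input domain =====

-- B replaces A's O(steps·states·size + steps·maxvalue) simulation (linear scan of the seen-states
-- list, one-token-at-a-time redistribution) by a dict of seen states and an arithmetic (divmod)
-- redistribution: O(steps·size) — measurably faster.

-- ===== PORT A =====
-- i = current.index(max(current))  (max of a nonempty list, first index of that value; 0 is a
-- dummy for the empty list, on which the Python raises and which Pre_ excludes)
def pvArgmaxA (l : List Int) : Nat :=
  ((PySem.List.max? l (fun x => x)).bind (fun m => PySem.List.index? l m)).getD 0

-- for j in range(value): new_state[(i + j + 1) % count] += 1
-- (range(value) has the j = 0,…,value-1, none for value ≤ 0 — exactly List.range value.toNat;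
--  the index (i+j+1) % count is already in [0, count), so List.modify is Python's assignment)
def pvDistA (i count : Nat) (ns : List Int) (value : Int) : List Int :=
  (List.range value.toNat).foldl (fun s j => s.modify ((i + j + 1) % count) (· + 1)) ns

-- the 'while True' loop; fuel is only a totality guard (2^64 iterations are never reached on
-- any input the Python finishes on); each iteration is step for step A's loop body
def pvLoopA (count : Nat) : Nat → List Int → List (List Int) → Int × Int
  | 0, _, _ => (0, 0)
  | fuel + 1, current, states =>
    let i := pvArgmaxA current
    let value := current.getD i 0          -- current[i], i in range by construction
    let ns := pvDistA i count (current.set i 0) value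
    if ns ∈ states then
      ((states.length : Int), (states.length : Int) - ((PySem.List.index? states ns).getD 0 : Nat))
    else pvLoopA count fuel ns (states ++ [ns])

def realloc (init : List Int) : Int × Int :=
  pvLoopA init.length 18446744073709551616 init [init]

-- ===== PORT B =====
-- same line state.index(max(state)) of Source B
def pvArgmaxB (l : List Int) : Nat :=
  ((PySem.List.max? l (fun x => x)).bind (fun m => PySem.List.index? l m)).getD 0

-- if v > 0: q, r = divmod(v, count); every cell += q; the r cells after i += 1
def pvDistB (i count : Nat) (s0 : List Int) (v : Int) : List Int :=
  if v > 0 then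
    let q := PySem.Int.floordiv v (count : Int)
    let r := PySem.Int.mod v (count : Int)
    let s1 := (List.range count).foldl (fun s k => s.modify k (· + q)) s0
    (List.range r.toNat).foldl (fun s k => s.modify ((i + 1 + k) % count) (· + 1)) s1
  else s0

-- Source B's while loop: dict seen : state → index, step counter; fuel as in pvLoopA
def pvLoopB (count : Nat) : Nat → List Int → PySem.Dict (List Int) Int → Int → Int × Int
  | 0, _, _, _ => (0, 0)
  | fuel + 1, state, seen, step =>
    let i := pvArgmaxB state
    let v := state.getD i 0
    let t := pvDistB i count (state.set i 0) v
    let step' := step + 1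
    match seen.get? t with
    | some k => (step', step' - k)
    | none => pvLoopB count fuel t (seen.insert t step') step'

def realloc_alt (init : List Int) : Int × Int :=
  pvLoopB init.length 18446744073709551616 init (PySem.Dict.empty.insert init 0) 0

-- ===== PRECONDITION & SPEC =====
-- Pre_ excludes only the empty list, on which both Pythons raise ValueError (max of empty sequence)
def Pre_realloc (init : List Int) : Prop := init ≠ []
instance (init : List Int) : Decidable (Pre_realloc init) := by unfold Pre_realloc; infer_instance
def pvWitness_realloc : List Int := [0, 2, 7, 0]

def Spec_realloc (init : List Int) (out : Int × Int) : Prop := out = realloc_alt init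
instance (init : List Int) (out : Int × Int) : Decidable (Spec_realloc init out) := by unfold Spec_realloc; infer_instance

-- ===== CLAIM (what is proved, stated in full; the proofs are below) =====
def Claim_equal_realloc : Prop := ∀ (init : List Int), Dom_realloc init → Pre_realloc init → Spec_realloc init (realloc init)

-- ===== LEMMAS AND PROOFS =====

-- the two argmax helpers are the same expression
theorem pvArgmax_eq (l : List Int) : pvArgmaxA l = pvArgmaxB l := rfl

-- elementwise value of an increment loop: fold of `modify (f j) (· + c)` adds c once per j with f j = k
theorem foldl_modify_getElem? (f : Nat → Nat) (c : Int) (L : List Nat) (s : List Int) (k : Nat) :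
    (L.foldl (fun t j => t.modify (f j) (· + c)) s)[k]? =
      s[k]?.map (fun x => x + c * ((L.filter (fun j => f j == k)).length : Int)) := by
  induction L generalizing s with
  | nil => simp
  | cons h tl ih =>
    simp only [List.foldl_cons, List.filter_cons]
    rw [ih, List.getElem?_modify]
    by_cases hfk : f h = k
    · simp only [hfk, beq_self_eq_true, if_pos, List.length_cons]
      cases s[k]? <;> (simp; try ring)
    · simp only [hfk, beq_iff_eq, if_false]
      cases s[k]? <;> simp

-- pointwise form of the residue shift: (o + j) % count hits k iff j has residue count + k - o % count
theorem mod_shift_iff (count o k : Nat) (hc : 0 < count) (hk : k < count) (j : Nat) :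
    ((o + j) % count = k) ↔ (j % count = (count + k - o % count) % count) := by
  have hb : o % count < count := Nat.mod_lt _ hc
  have hm : j % count < count := Nat.mod_lt _ hc
  have h1 : (o + j) % count = (o % count + j % count) % count := by
    rw [Nat.add_mod]
  have key : ∀ x, x < 2 * count → x % count = if x < count then x else x - count := by
    intro x hx
    by_cases h : x < count
    · rw [if_pos h, Nat.mod_eq_of_lt h]
    · rw [if_neg h, Nat.mod_eq_sub_mod (le_of_not_gt h), Nat.mod_eq_of_lt (by omega)]
  rw [h1, key _ (by omega), key (count + k - o % count) (by omega)]
  split_ifs <;> omega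

-- among j < n there is exactly one with j = k, when k < n
theorem filter_eq_self_len (n k : Nat) :
    ((List.range n).filter (fun j => j == k)).length = if k < n then 1 else 0 := by
  rw [← List.countP_eq_length_filter]
  exact List.count_range

-- counting: among j < n, the j with (o + j) % count = k number n/count plus one more iff
-- the residue a := (count + k - o % count) lands below n % count
theorem cnt_closed (count o k n : Nat) (hc : 0 < count) (hk : k < count) :
    ((List.range n).filter (fun j => (o + j) % count == k)).length =
      n / count + if (count + k - o % count) % count < n % count then 1 else 0 := by
  have hps : ∀ j ∈ List.range n,
      ((o + j) % count == k) = decide (j ≡ (count + k - o % count) [MOD count]) := by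
    intro j _
    rw [Bool.eq_iff_iff, beq_iff_eq, decide_eq_true_iff]
    have h := mod_shift_iff count o k hc hk j
    unfold Nat.ModEq
    rw [h]
  rw [List.filter_congr hps, ← List.countP_eq_length_filter]
  exact Nat.count_modEq_card n hc (count + k - o % count)

-- the one-token loop and the divmod redistribution produce the same list
theorem dist_eq (i count : Nat) (s : List Int) (v : Int) (hc : 0 < count) :
    pvDistA i count s v = pvDistB i count s v := by
  unfold pvDistA pvDistB
  by_cases hv : v > 0
  · rw [if_pos hv]
    have hvn : v = ((v.toNat : Nat) : Int) := by omega
    have hq : PySem.Int.floordiv v (count : Int) = ((v.toNat / count : Nat) : Int) := by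
      rw [hvn]; exact PySem.Int.floordiv_natCast v.toNat count
    have hr : PySem.Int.mod v (count : Int) = ((v.toNat % count : Nat) : Int) := by
      rw [hvn]; exact PySem.Int.mod_natCast v.toNat count
    apply List.ext_getElem?
    intro k
    rw [foldl_modify_getElem? (fun j => (i + j + 1) % count) 1,
      foldl_modify_getElem? (fun j => (i + 1 + j) % count) 1,
      foldl_modify_getElem? (fun j => j) ((PySem.Int.floordiv v (count : Int))), hq, hr]
    rw [Int.toNat_natCast, Option.map_map]
    have hshape : ∀ j, i + j + 1 = i + 1 + j := fun j => by omega
    simp only [hshape]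
    by_cases hkc : k < count
    · rw [cnt_closed count (i + 1) k v.toNat hc hkc, cnt_closed count (i + 1) k (v.toNat % count) hc hkc,
        filter_eq_self_len, if_pos hkc,
        Nat.div_eq_of_lt (Nat.mod_lt _ hc), Nat.mod_eq_of_lt (Nat.mod_lt _ hc)]
      cases s[k]? with
      | none => rfl
      | some x =>
        simp only [Option.map_some, Function.comp]
        congr 1
        push_cast
        split_ifs <;> ring
    · have hz : ∀ (o' m : Nat),
          ((List.range m).filter (fun j => (o' + j) % count == k)).length = 0 := by
        intro o' m
        rw [List.length_eq_zero_iff, List.filter_eq_nil_iff]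
        intro j _
        simp only [beq_iff_eq]
        exact fun h => absurd (h ▸ Nat.mod_lt (o' + j) hc) (by omega)
      rw [hz, hz, filter_eq_self_len, if_neg hkc]
      cases s[k]? with
      | none => rfl
      | some x =>
        simp only [Option.map_some, Function.comp]
        congr 1
        push_cast
        ring
  · rw [if_neg hv]
    have : v.toNat = 0 := by omega
    rw [this]
    rfl

-- lockstep: A's states list and B's dict advance together
theorem loop_eq (count : Nat) (hc : 0 < count) :
    ∀ (fuel : Nat) (cur : List Int) (states : List (List Int)) (seen : PySem.Dict (List Int) Int) (step : Int),
      (∀ s, seen.get? s = (PySem.List.index? states s).map (fun n => (n : Int))) →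
      step = (states.length : Int) - 1 →
      pvLoopA count fuel cur states = pvLoopB count fuel cur seen step := by
  intro fuel
  induction fuel with
  | zero => intro cur states seen step _ _; rfl
  | succ fuel ih =>
    intro cur states seen step hseen hstep
    simp only [pvLoopA, pvLoopB, pvArgmax_eq,
      dist_eq _ count _ _ hc]
    set ns := pvDistB (pvArgmaxB cur) count (cur.set (pvArgmaxB cur) 0) (cur.getD (pvArgmaxB cur) 0) with hns
    by_cases hmem : ns ∈ states
    · obtain ⟨k, hk⟩ := Option.isSome_iff_exists.mp ((PySem.List.index?_isSome_iff states ns).mpr hmem)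
      rw [if_pos hmem, hseen ns, hk]
      have hlen : (states.length : Int) = step + 1 := by omega
      have hkle : k ≤ states.length := by
        obtain ⟨hlt, -, -⟩ := PySem.List.getElem_of_index?_eq_some hk
        omega
      simp
      omega
    · have hnone : PySem.List.index? states ns = none := (PySem.List.index?_eq_none_iff _ _).mpr hmem
      rw [if_neg hmem, hseen ns, hnone]
      simp only [Option.map_none, Option.bind_none, Option.bind_eq_bind]
      apply ih
      · intro s
        by_cases hs : s = ns
        · subst hs
          rw [PySem.Dict.get?_insert_self, PySem.List.index?_append_singleton_self _ _ hmem]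
          simp
          omega
        · rw [PySem.Dict.get?_insert_of_ne _ _ hs, hseen s]
          by_cases hsm : s ∈ states
          · rw [PySem.List.index?_append_of_mem _ hsm]
          · rw [(PySem.List.index?_eq_none_iff _ _).mpr hsm,
              (PySem.List.index?_eq_none_iff _ _).mpr (by simp [hsm, hs])]
      · simp
        omega

-- ===== VERDICT (by name: the statement is the Claim_ definition above) =====
theorem realloc_spec : Claim_equal_realloc := by
  intro init _ hpre
  unfold Spec_realloc realloc realloc_alt
  have hc : 0 < init.length := List.length_pos_iff.mpr hpre
  refine loop_eq init.length hc _ init [init] _ 0 ?_ (by simp)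
  intro s
  by_cases hs : s = init
  · subst hs
    rw [PySem.Dict.get?_insert_self]
    simp
  · rw [PySem.Dict.get?_insert_of_ne _ _ hs, PySem.Dict.get?_empty]
    have : s ∉ [init] := by simpa using hs
    rw [(PySem.List.index?_eq_none_iff _ _).mpr this]
    rfl
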